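-- pv_equiv track=rewrite | github.com/Wind010/advent_of_code | 2024/8/part2.py | determine_antinodes_original
-- ===== SOURCE A (Python) =====
-- def determine_antinodes_original(grid, antennas):
--     rows, cols = len(grid), len(grid[0])
--     antinodes = set()
--
--     for freq, coords in antennas.items():
--         for r, _ in enumerate(coords):
--             for c in range(r + 1, len(coords)):
--                 x1, y1 = coords[r]
--                 x2, y2 = coords[c]
--                 dx, dy = x2 - x1, y2 - y1
--
--                 # Positive direction from (x1, y1) to (x2, y2)
--                 x, y = x1, y1
--                 while 0 <= x < rows and 0 <= y < cols:
--                     antinodes.add((x, y))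
--                     x += dx
--                     y += dy
--
--                 # Negative direction from (x2, y2) to (x1, y1)
--                 x, y = x2, y2
--                 while 0 <= x < rows and 0 <= y < cols:
--                     antinodes.add((x, y))
--                     x -= dx
--                     y -= dy
--
--                 # Could make in_bounds function check.
--     return antinodes
-- ===== SOURCE B (Python) =====
-- def _ray(x, y, dx, dy, rows, cols):
--     # the on-grid cells (x + k*dx, y + k*dy), k = 0, 1, 2, ..., in closed form:
--     # empty when the start is off the grid, else everything up to the nearest edge
--     if not (0 <= x < rows and 0 <= y < cols):
--         return []
--     steps = []
--     if dx > 0: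
--         steps.append((rows - 1 - x) // dx)
--     elif dx < 0:
--         steps.append(x // -dx)
--     if dy > 0:
--         steps.append((cols - 1 - y) // dy)
--     elif dy < 0:
--         steps.append(y // -dy)
--     m = min(steps)
--     return [(x + k * dx, y + k * dy) for k in range(m + 1)]
--
--
-- def determine_antinodes_original(grid, antennas):
--     rows, cols = len(grid), len(grid[0])
--     antinodes = set()
--     for coords in antennas.values():
--         for i in range(len(coords)):
--             for j in range(i + 1, len(coords)):
--                 x1, y1 = coords[i]
--                 x2, y2 = coords[j]
--                 dx, dy = x2 - x1, y2 - y1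
--                 antinodes.update(_ray(x1, y1, dx, dy, rows, cols))
--                 antinodes.update(_ray(x2, y2, -dx, -dy, rows, cols))
--     return antinodes
-- ===== Notes on version B (the rewrite author's own statement) =====
-- stated objective: alternative
-- what changed: Per same-frequency antenna pair, B replaces A's two step-by-step while-walks (bounds-tested at every step) by a closed-form ray helper: one floor-division computation of how many steps the ray from each antenna stays on the grid, then a direct enumeration of its cells; Pre_ excludes only the empty grid (A raises IndexError) and a frequency repeating an on-grid position (A's zero-step walk never terminates, B's min() of an empty bounds list raises ValueError).
import Mathlib
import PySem

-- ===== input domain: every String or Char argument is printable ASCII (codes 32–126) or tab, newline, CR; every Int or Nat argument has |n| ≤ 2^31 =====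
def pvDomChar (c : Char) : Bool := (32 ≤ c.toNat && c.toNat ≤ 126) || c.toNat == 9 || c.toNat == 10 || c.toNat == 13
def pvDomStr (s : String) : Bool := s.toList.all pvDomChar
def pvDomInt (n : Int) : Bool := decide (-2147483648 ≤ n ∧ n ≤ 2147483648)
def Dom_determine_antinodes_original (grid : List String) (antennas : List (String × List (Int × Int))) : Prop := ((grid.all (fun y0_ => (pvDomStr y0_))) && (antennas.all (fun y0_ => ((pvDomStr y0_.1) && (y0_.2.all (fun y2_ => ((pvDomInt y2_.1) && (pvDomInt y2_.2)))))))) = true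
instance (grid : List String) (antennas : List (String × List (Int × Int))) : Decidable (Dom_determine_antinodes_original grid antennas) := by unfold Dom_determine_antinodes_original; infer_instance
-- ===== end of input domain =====

-- B replaces A's two step-by-step while-walks per antenna pair (bounds-tested at every step) by a
-- closed-form ray: one floor-division computation of how far the ray from each antenna stays on the
-- grid, then a direct enumeration of its cells; objective: alternative (same asymptotic cost).

-- ===== PORT A =====
-- '0 <= x < rows and 0 <= y < cols'
def pvInbA (rows cols x y : Int) : Bool :=
  decide (0 ≤ x) && decide (x < rows) && decide (0 ≤ y) && decide (y < cols)

-- 'while 0 <= x < rows and 0 <= y < cols: antinodes.add((x,y)); x += dx; y += dy'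
-- (fuel only makes the loop total; on every input admitted by Pre_ the fuel passed is enough)
def pvWalkUp (rows cols dx dy : Int) : Nat → Int → Int → PySem.Set (Int × Int) → PySem.Set (Int × Int)
  | 0, _, _, acc => acc
  | fuel + 1, x, y, acc =>
    if pvInbA rows cols x y then
      pvWalkUp rows cols dx dy fuel (x + dx) (y + dy) (PySem.Set.add acc (x, y))
    else acc

-- same loop with 'x -= dx; y -= dy'
def pvWalkDown (rows cols dx dy : Int) : Nat → Int → Int → PySem.Set (Int × Int) → PySem.Set (Int × Int)
  | 0, _, _, acc => acc
  | fuel + 1, x, y, acc =>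
    if pvInbA rows cols x y then
      pvWalkDown rows cols dx dy fuel (x - dx) (y - dy) (PySem.Set.add acc (x, y))
    else acc

-- the body of A's innermost loop: both directional walks for the pair (p1, p2)
def pvPairA (rows cols : Int) (fuel : Nat) (p1 p2 : Int × Int)
    (acc : PySem.Set (Int × Int)) : PySem.Set (Int × Int) :=
  let dx := p2.1 - p1.1
  let dy := p2.2 - p1.2
  pvWalkDown rows cols dx dy fuel p2.1 p2.2 (pvWalkUp rows cols dx dy fuel p1.1 p1.2 acc)

def determine_antinodes_original (grid : List String) (antennas : List (String × List (Int × Int))) : List (Int × Int) :=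
  let rows : Int := grid.length
  let cols : Int := PySem.Str.len ((PySem.List.pyGet? grid 0).getD "")  -- grid[0]; Pre_ excludes grid = []
  let fuel : Nat := (rows + cols).toNat + 2
  antennas.foldl (fun acc fc =>
    (List.range fc.2.length).foldl (fun acc r =>
      (List.range' (r + 1) (fc.2.length - (r + 1))).foldl (fun acc c =>
        pvPairA rows cols fuel (fc.2.getD r (0, 0)) (fc.2.getD c (0, 0)) acc) acc) acc)
    PySem.Set.empty

-- ===== PORT B =====
-- the 'steps' list of _ray: per-axis closed-form bound on how many steps stay on the grid
def pvSteps (x y dx dy rows cols : Int) : List Int :=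
  (if 0 < dx then [PySem.Int.floordiv (rows - 1 - x) dx]
   else if dx < 0 then [PySem.Int.floordiv x (-dx)] else []) ++
  (if 0 < dy then [PySem.Int.floordiv (cols - 1 - y) dy]
   else if dy < 0 then [PySem.Int.floordiv y (-dy)] else [])

-- '_ray(x, y, dx, dy, rows, cols)'
def pvRay (x y dx dy rows cols : Int) : List (Int × Int) :=
  if 0 ≤ x ∧ x < rows ∧ 0 ≤ y ∧ y < cols then
    -- min(steps); Pre_ excludes duplicated on-grid antennas, on which steps = [] (ValueError)
    let m : Int := (PySem.List.min? (pvSteps x y dx dy rows cols) (fun v => v)).getD 0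
    (PySem.List.pyRange 0 (m + 1) 1).map (fun k => (x + k * dx, y + k * dy))
  else []

-- the body of B's innermost loop: 'antinodes.update(_ray(...))' twice
def pvPairB (rows cols : Int) (p1 p2 : Int × Int)
    (acc : PySem.Set (Int × Int)) : PySem.Set (Int × Int) :=
  let dx := p2.1 - p1.1
  let dy := p2.2 - p1.2
  PySem.Set.update (PySem.Set.update acc (pvRay p1.1 p1.2 dx dy rows cols))
    (pvRay p2.1 p2.2 (-dx) (-dy) rows cols)

def determine_antinodes_original_alt (grid : List String) (antennas : List (String × List (Int × Int))) : List (Int × Int) :=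
  let rows : Int := grid.length
  let cols : Int := PySem.Str.len ((PySem.List.pyGet? grid 0).getD "")
  antennas.foldl (fun acc fc =>
    (List.range fc.2.length).foldl (fun acc r =>
      (List.range' (r + 1) (fc.2.length - (r + 1))).foldl (fun acc c =>
        pvPairB rows cols (fc.2.getD r (0, 0)) (fc.2.getD c (0, 0)) acc) acc) acc)
    PySem.Set.empty

-- ===== PRECONDITION & SPEC =====
-- Pre_ excludes the empty grid (A raises IndexError on grid[0]) and antenna lists in which some
-- frequency repeats an on-grid coordinate (A's first while loop has step (0,0) there and never
-- terminates, and B's min() of an empty steps list raises ValueError).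
def Pre_determine_antinodes_original (grid : List String) (antennas : List (String × List (Int × Int))) : Prop :=
  grid ≠ [] ∧ ∀ fc ∈ antennas, ∀ i < fc.2.length, ∀ j < fc.2.length, i ≠ j →
    fc.2.getD i (0, 0) = fc.2.getD j (0, 0) →
    ¬ (0 ≤ (fc.2.getD i (0, 0)).1 ∧ (fc.2.getD i (0, 0)).1 < (grid.length : Int) ∧
       0 ≤ (fc.2.getD i (0, 0)).2 ∧ (fc.2.getD i (0, 0)).2 < PySem.Str.len (grid.headD ""))
instance (grid : List String) (antennas : List (String × List (Int × Int))) : Decidable (Pre_determine_antinodes_original grid antennas) := by unfold Pre_determine_antinodes_original; infer_instance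

def pvWitness_determine_antinodes_original : List String × (List (String × List (Int × Int))) :=
  (["ab", "cb"], [("b", [(0, 1), (1, 1)]), ("c", [(1, 0)])])

def Spec_determine_antinodes_original (grid : List String) (antennas : List (String × List (Int × Int))) (out : List (Int × Int)) : Prop := out = determine_antinodes_original_alt grid antennas
instance (grid : List String) (antennas : List (String × List (Int × Int))) (out : List (Int × Int)) : Decidable (Spec_determine_antinodes_original grid antennas out) := by unfold Spec_determine_antinodes_original; infer_instance

-- ===== CLAIM (what is proved, stated in full; the proofs are below) =====
def Claim_equal_determine_antinodes_original : Prop := ∀ (grid : List String) (antennas : List (String × List (Int × Int))), Dom_determine_antinodes_original grid antennas → Pre_determine_antinodes_original grid antennas → Spec_determine_antinodes_original grid antennas (determine_antinodes_original grid antennas)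

-- ===== LEMMAS AND PROOFS =====

lemma pvInbA_iff (rows cols x y : Int) :
    pvInbA rows cols x y = true ↔ (0 ≤ x ∧ x < rows ∧ 0 ≤ y ∧ y < cols) := by
  simp [pvInbA, and_assoc]

-- the fueled walk, characterized: it adds exactly the points of its direction's run
lemma pvWalkUp_eq (rows cols dx dy : Int) (n : Nat) :
    ∀ (fuel : Nat) (x y : Int) (acc : PySem.Set (Int × Int)),
    (∀ i : Nat, i < n → pvInbA rows cols (x + i * dx) (y + i * dy) = true) →
    pvInbA rows cols (x + n * dx) (y + n * dy) = false →
    n < fuel →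
    pvWalkUp rows cols dx dy fuel x y acc
      = ((List.range n).map (fun i : Nat => (x + i * dx, y + i * dy))).foldl PySem.Set.add acc := by
  induction n with
  | zero =>
    intro fuel x y acc _ hbad hf
    obtain ⟨m, rfl⟩ : ∃ m, fuel = m + 1 := ⟨fuel - 1, by omega⟩
    simp only [pvWalkUp]
    rw [if_neg]
    · simp
    · simpa using hbad
  | succ n ih =>
    intro fuel x y acc hgood hbad hf
    obtain ⟨m, rfl⟩ : ∃ m, fuel = m + 1 := ⟨fuel - 1, by omega⟩
    simp only [pvWalkUp]
    rw [if_pos (by simpa using hgood 0 (Nat.succ_pos n))]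
    rw [ih m (x + dx) (y + dy) (PySem.Set.add acc (x, y))
      (fun i hi => by
        have h := hgood (i + 1) (by omega)
        push_cast at h
        have e1 : x + dx + (i : Int) * dx = x + ((i : Int) + 1) * dx := by ring
        have e2 : y + dy + (i : Int) * dy = y + ((i : Int) + 1) * dy := by ring
        rw [e1, e2]; exact h)
      (by
        push_cast at hbad
        have e1 : x + dx + (n : Int) * dx = x + ((n : Int) + 1) * dx := by ring
        have e2 : y + dy + (n : Int) * dy = y + ((n : Int) + 1) * dy := by ring
        rw [e1, e2]; exact hbad)
      (by omega)]
    rw [List.range_succ_eq_map, List.map_cons, List.foldl_cons, List.map_map]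
    have e0 : ((x + (0 : Nat) * dx, y + (0 : Nat) * dy) : Int × Int) = (x, y) := by
      simp
    rw [e0]
    congr 1
    apply List.map_congr_left
    intro a _
    simp only [Function.comp_apply, Nat.succ_eq_add_one, Prod.mk.injEq]
    constructor <;> (push_cast; ring)

lemma pvWalkDown_eq_up (rows cols dx dy : Int) :
    ∀ (fuel : Nat) (x y : Int) (acc : PySem.Set (Int × Int)),
    pvWalkDown rows cols dx dy fuel x y acc = pvWalkUp rows cols (-dx) (-dy) fuel x y acc := by
  intro fuel
  induction fuel with
  | zero => intro x y acc; rfl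
  | succ m ih =>
    intro x y acc
    simp only [pvWalkDown, pvWalkUp]
    split
    · rw [ih]; ring_nf
    · rfl

-- one axis, positive step: its steps bound is exact
lemma axis_pos (p d n k : Int) (hd : 0 < d) (hp : 0 ≤ p) (hk : 0 ≤ k) :
    k ≤ PySem.Int.floordiv (n - 1 - p) d ↔ (0 ≤ p + k * d ∧ p + k * d < n) := by
  rw [PySem.Int.le_floordiv_iff_mul_le hd]
  constructor
  · intro h; constructor <;> nlinarith
  · rintro ⟨_, h⟩; nlinarith

-- one axis, negative step: its steps bound is exact
lemma axis_neg (p d n k : Int) (hd : d < 0) (hpn : p < n) (hk : 0 ≤ k) :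
    k ≤ PySem.Int.floordiv p (-d) ↔ (0 ≤ p + k * d ∧ p + k * d < n) := by
  rw [PySem.Int.le_floordiv_iff_mul_le (by omega)]
  constructor
  · intro h; constructor <;> nlinarith
  · rintro ⟨h, _⟩; nlinarith

-- min(steps) characterizes exactly the on-grid parameters k ≥ 0 of the ray
lemma steps_min_iff (x y dx dy rows cols : Int)
    (hx : 0 ≤ x ∧ x < rows) (hy : 0 ≤ y ∧ y < cols) (hd : ¬ (dx = 0 ∧ dy = 0)) :
    ∀ k : Int, 0 ≤ k →
      ((k ≤ (PySem.List.min? (pvSteps x y dx dy rows cols) (fun v => v)).getD 0) ↔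
        pvInbA rows cols (x + k * dx) (y + k * dy) = true) := by
  intro k hk
  rw [pvInbA_iff]
  have hxiff : ∀ a ∈ (if 0 < dx then [PySem.Int.floordiv (rows - 1 - x) dx]
      else if dx < 0 then [PySem.Int.floordiv x (-dx)] else []),
      (k ≤ a ↔ (0 ≤ x + k * dx ∧ x + k * dx < rows)) := by
    intro a ha
    by_cases h1 : 0 < dx
    · rw [if_pos h1] at ha
      simp only [List.mem_singleton] at ha
      subst ha
      exact axis_pos x dx rows k h1 hx.1 hk
    · rw [if_neg h1] at ha
      by_cases h2 : dx < 0
      · rw [if_pos h2] at ha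
        simp only [List.mem_singleton] at ha
        subst ha
        exact axis_neg x dx rows k h2 hx.2 hk
      · rw [if_neg h2] at ha
        simp at ha
  have hyiff : ∀ a ∈ (if 0 < dy then [PySem.Int.floordiv (cols - 1 - y) dy]
      else if dy < 0 then [PySem.Int.floordiv y (-dy)] else []),
      (k ≤ a ↔ (0 ≤ y + k * dy ∧ y + k * dy < cols)) := by
    intro a ha
    by_cases h1 : 0 < dy
    · rw [if_pos h1] at ha
      simp only [List.mem_singleton] at ha
      subst ha
      exact axis_pos y dy cols k h1 hy.1 hk
    · rw [if_neg h1] at ha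
      by_cases h2 : dy < 0
      · rw [if_pos h2] at ha
        simp only [List.mem_singleton] at ha
        subst ha
        exact axis_neg y dy cols k h2 hy.2 hk
      · rw [if_neg h2] at ha
        simp at ha
  unfold pvSteps
  by_cases hdx : dx = 0
  · have hdy : dy ≠ 0 := by tauto
    subst hdx
    rw [if_neg (by omega), if_neg (by omega), List.nil_append]
    rcases lt_or_gt_of_ne hdy with h | h
    · rw [if_neg (by omega), if_pos h, PySem.List.min?_id_cons]
      simp only [List.foldl_nil, Option.getD_some]
      rw [axis_neg y dy cols k h hy.2 hk]
      constructor
      · rintro ⟨u, v⟩; refine ⟨by omega, by omega, u, v⟩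
      · rintro ⟨_, _, u, v⟩; exact ⟨u, v⟩
    · rw [if_pos h, PySem.List.min?_id_cons]
      simp only [List.foldl_nil, Option.getD_some]
      rw [axis_pos y dy cols k h hy.1 hk]
      constructor
      · rintro ⟨u, v⟩; refine ⟨by omega, by omega, u, v⟩
      · rintro ⟨_, _, u, v⟩; exact ⟨u, v⟩
  · rcases lt_or_gt_of_ne hdx with hneg | hpos
    · rw [if_neg (by omega), if_pos hneg]
      by_cases hdy0 : dy = 0
      · subst hdy0
        rw [if_neg (by omega), if_neg (by omega), List.append_nil, PySem.List.min?_id_cons]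
        simp only [List.foldl_nil, Option.getD_some]
        rw [axis_neg x dx rows k hneg hx.2 hk]
        constructor
        · rintro ⟨u, v⟩; refine ⟨u, v, by omega, by omega⟩
        · rintro ⟨u, v, _, _⟩; exact ⟨u, v⟩
      · rcases lt_or_gt_of_ne hdy0 with h | h
        · rw [if_neg (by omega), if_pos h, List.singleton_append, PySem.List.min?_id_cons]
          simp only [List.foldl_cons, List.foldl_nil, Option.getD_some, le_min_iff]
          rw [axis_neg x dx rows k hneg hx.2 hk, axis_neg y dy cols k h hy.2 hk]
          tauto
        · rw [if_pos h, List.singleton_append, PySem.List.min?_id_cons]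
          simp only [List.foldl_cons, List.foldl_nil, Option.getD_some, le_min_iff]
          rw [axis_neg x dx rows k hneg hx.2 hk, axis_pos y dy cols k h hy.1 hk]
          tauto
    · rw [if_pos hpos]
      by_cases hdy0 : dy = 0
      · subst hdy0
        rw [if_neg (by omega), if_neg (by omega), List.append_nil, PySem.List.min?_id_cons]
        simp only [List.foldl_nil, Option.getD_some]
        rw [axis_pos x dx rows k hpos hx.1 hk]
        constructor
        · rintro ⟨u, v⟩; refine ⟨u, v, by omega, by omega⟩
        · rintro ⟨u, v, _, _⟩; exact ⟨u, v⟩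
      · rcases lt_or_gt_of_ne hdy0 with h | h
        · rw [if_neg (by omega), if_pos h, List.singleton_append, PySem.List.min?_id_cons]
          simp only [List.foldl_cons, List.foldl_nil, Option.getD_some, le_min_iff]
          rw [axis_pos x dx rows k hpos hx.1 hk, axis_neg y dy cols k h hy.2 hk]
          tauto
        · rw [if_pos h, List.singleton_append, PySem.List.min?_id_cons]
          simp only [List.foldl_cons, List.foldl_nil, Option.getD_some, le_min_iff]
          rw [axis_pos x dx rows k hpos hx.1 hk, axis_pos y dy cols k h hy.1 hk]
          tauto

-- A's directional walk equals folding B's closed-form ray into the set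
lemma walk_eq_ray (rows cols x y dx dy : Int) (acc : PySem.Set (Int × Int))
    (hd : ¬ (dx = 0 ∧ dy = 0)) :
    pvWalkUp rows cols dx dy ((rows + cols).toNat + 2) x y acc
      = (pvRay x y dx dy rows cols).foldl PySem.Set.add acc := by
  unfold pvRay
  by_cases hin : 0 ≤ x ∧ x < rows ∧ 0 ≤ y ∧ y < cols
  · rw [if_pos hin]
    set m : Int := (PySem.List.min? (pvSteps x y dx dy rows cols) (fun v => v)).getD 0 with hm
    have hiff := steps_min_iff x y dx dy rows cols ⟨hin.1, hin.2.1⟩ ⟨hin.2.2.1, hin.2.2.2⟩ hd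
    have hm0 : 0 ≤ m := by
      have h := (hiff 0 le_rfl).mpr (by rw [pvInbA_iff]; simpa using hin)
      omega
    -- m is bounded by the grid size (so the fuel suffices)
    have hmb : m < rows + cols := by
      have h := (hiff m hm0).mp le_rfl
      rw [pvInbA_iff] at h
      rcases not_and_or.mp hd with h1 | h1
      · rcases lt_or_gt_of_ne h1 with hh | hh <;> nlinarith
      · rcases lt_or_gt_of_ne h1 with hh | hh <;> nlinarith
    have hnk : (((m + 1).toNat : Nat) : Int) = m + 1 := by omega
    have hgood : ∀ i : Nat, i < (m + 1).toNat →
        pvInbA rows cols (x + (i : Int) * dx) (y + (i : Int) * dy) = true := by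
      intro i hi
      exact (hiff (i : Int) (by omega)).mp (by omega)
    have hbad : pvInbA rows cols (x + (((m + 1).toNat : Nat) : Int) * dx)
        (y + (((m + 1).toNat : Nat) : Int) * dy) = false := by
      cases hb : pvInbA rows cols (x + (((m + 1).toNat : Nat) : Int) * dx)
          (y + (((m + 1).toNat : Nat) : Int) * dy) with
      | false => rfl
      | true =>
        have := (hiff (((m + 1).toNat : Nat) : Int) (by omega)).mpr hb
        omega
    rw [pvWalkUp_eq rows cols dx dy (m + 1).toNat _ x y acc hgood hbad (by omega)]
    show _ = ((PySem.List.pyRange 0 (m + 1) 1).map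
      (fun k => (x + k * dx, y + k * dy))).foldl PySem.Set.add acc
    rw [List.foldl_map, PySem.List.pyRange_one, List.foldl_map, List.foldl_map]
    have hlen : (m + 1 - 0).toNat = (m + 1).toNat := by omega
    rw [hlen]
    apply PySem.List.foldl_congr_mem
    intro s i _
    norm_num
  · rw [if_neg hin]
    obtain ⟨f, hfuel⟩ : ∃ f, (rows + cols).toNat + 2 = f + 1 := ⟨(rows + cols).toNat + 1, by omega⟩
    rw [hfuel]
    simp only [pvWalkUp]
    rw [if_neg (by rw [pvInbA_iff]; exact hin)]
    simp

-- A's pair body equals B's pair body for a pair that is not a duplicated on-grid antenna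
lemma pair_eq (rows cols : Int) (p1 p2 : Int × Int)
    (hdup : p1 = p2 → pvInbA rows cols p1.1 p1.2 = false) (acc : PySem.Set (Int × Int)) :
    pvPairA rows cols ((rows + cols).toNat + 2) p1 p2 acc = pvPairB rows cols p1 p2 acc := by
  obtain ⟨x1, y1⟩ := p1
  obtain ⟨x2, y2⟩ := p2
  simp only [pvPairA, pvPairB]
  by_cases hz : x2 - x1 = 0 ∧ y2 - y1 = 0
  · -- duplicated pair: under the hypothesis it is off-grid, so both sides add nothing
    have hpp : ((x1, y1) : Int × Int) = (x2, y2) := by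
      simp only [Prod.mk.injEq]; omega
    have hib := hdup hpp
    simp only at hib
    have hib2 : pvInbA rows cols x2 y2 = false := by
      have e1 : x2 = x1 := by omega
      have e2 : y2 = y1 := by omega
      rw [e1, e2]; exact hib
    have hoff : ¬ (0 ≤ x1 ∧ x1 < rows ∧ 0 ≤ y1 ∧ y1 < cols) := by
      intro hcon
      rw [(pvInbA_iff rows cols x1 y1).mpr hcon] at hib
      simp at hib
    have hoff2 : ¬ (0 ≤ x2 ∧ x2 < rows ∧ 0 ≤ y2 ∧ y2 < cols) := by
      intro hcon
      rw [(pvInbA_iff rows cols x2 y2).mpr hcon] at hib2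
      simp at hib2
    obtain ⟨f, hfuel⟩ : ∃ f, (rows + cols).toNat + 2 = f + 1 := ⟨(rows + cols).toNat + 1, by omega⟩
    rw [hfuel]
    simp only [pvWalkUp, pvWalkDown]
    rw [if_neg (by simpa using hib2), if_neg (by simpa using hib)]
    unfold pvRay
    rw [if_neg hoff, if_neg hoff2]
    rfl
  · rw [pvWalkDown_eq_up]
    rw [walk_eq_ray rows cols x1 y1 (x2 - x1) (y2 - y1) acc hz]
    rw [walk_eq_ray rows cols x2 y2 (-(x2 - x1)) (-(y2 - y1)) _ (by
      rintro ⟨u, v⟩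
      exact hz ⟨by omega, by omega⟩)]
    rfl

lemma triple_eq (rows cols : Int) (coords : List (Int × Int))
    (hdup : ∀ i < coords.length, ∀ j < coords.length, i ≠ j →
      coords.getD i (0, 0) = coords.getD j (0, 0) →
      pvInbA rows cols (coords.getD i (0, 0)).1 (coords.getD i (0, 0)).2 = false)
    (acc : PySem.Set (Int × Int)) :
    (List.range coords.length).foldl (fun acc r =>
      (List.range' (r + 1) (coords.length - (r + 1))).foldl (fun acc c =>
        pvPairA rows cols ((rows + cols).toNat + 2) (coords.getD r (0, 0)) (coords.getD c (0, 0)) acc) acc) acc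
    = (List.range coords.length).foldl (fun acc r =>
      (List.range' (r + 1) (coords.length - (r + 1))).foldl (fun acc c =>
        pvPairB rows cols (coords.getD r (0, 0)) (coords.getD c (0, 0)) acc) acc) acc := by
  apply PySem.List.foldl_congr_mem
  intro a r hrm
  apply PySem.List.foldl_congr_mem
  intro a2 c hcm
  rw [List.mem_range] at hrm
  rw [List.mem_range'_1] at hcm
  apply pair_eq rows cols _ _ _ a2
  intro heq
  exact hdup r hrm c (by omega) (by omega) heq

-- ===== VERDICT (by name: the statement is the Claim_ definition above) =====
theorem determine_antinodes_original_spec : Claim_equal_determine_antinodes_original := by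
  intro grid antennas _ hpre
  obtain ⟨hg, hdup⟩ := hpre
  unfold Spec_determine_antinodes_original determine_antinodes_original determine_antinodes_original_alt
  simp only []
  apply PySem.List.foldl_congr_mem
  intro acc fc hfc
  have hcols : (PySem.List.pyGet? grid 0).getD "" = grid.headD "" := by
    cases grid with
    | nil => exact absurd rfl hg
    | cons g t => simp [PySem.List.pyGet?, PySem.List.pyIdx?]
  rw [hcols]
  apply triple_eq
  intro i hi j hj hij heq
  have h := hdup fc hfc i hi j hj hij heq
  cases hb : pvInbA (grid.length : Int) (PySem.Str.len (grid.headD "")) (fc.2.getD i (0, 0)).1 (fc.2.getD i (0, 0)).2 with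
  | false => rfl
  | true =>
    rw [pvInbA_iff] at hb
    exact absurd ⟨hb.1, hb.2.1, hb.2.2.1, hb.2.2.2⟩ h
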